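-- pv_equiv track=rewrite | github.com/kangtae210/leetCode | P_make_id.py | solution
-- ===== SOURCE A (Python) =====
-- def solution(new_id):
--     length = len(new_id)
--     # [1단계]
--     # 모든 대문자는 소문자로 치환합니다.
--     new_id = new_id.lower()
--
--     # [2단계]
--     # 알파벳 소문자, 숫자, 빼기기호, 밑줄기호, 마침표를
--     # 제외한 모든 문자를 제거합니다.
--     can_use = ['-', '_', '.']
--     for i in range(length):
--         if '0' <= new_id[i] and new_id[i] <='9':
--             continue
--         elif 'a' <= new_id[i] and new_id[i] <= 'z':
--             continue
--         elif new_id[i] in can_use: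
--             continue
--         else:
--             z = new_id[i]
--             new_id = new_id.replace(z, " ")
--             continue
--
--     new_id = new_id.replace(" ", "")
--
--     # [3단계]
--     # 마침표기호 '.'는 두번 연속으로 사용할 수 없습니다.
--     while True:
--         if not('..' in new_id):
--             break
--         new_id = new_id.replace('..', '.')
--
--     # [4단계]
--     # 마침표는 id의 처음이나 끝에 위치할 수 없습니다.
--     new_id = new_id.lstrip('.')
--     new_id = new_id.rstrip('.')
--
--     # [5단계]
--     # id가 빈 문자열이라면, id를 'a'로 합니다.
--     if new_id == "":
--         new_id = 'a'
--
--     # [6단계]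
--     # id의 길이가 16을 넘어가면 15번째 이후의 문자는 제거합니다.
--     # 제거 후 마지막 문자가 마침표인 경우 마침표 문자도 제거합니다.
--     if len(new_id) >=16:
--         new_id = new_id[0:15]
--     new_id = new_id.rstrip('.')
--
--     # [7단계]
--     # id의 길이가 2이하라면, id의 마지막 문자를
--     # id의 길이가 3이 될때까지 반복합니다.
--     while True:
--         if len(new_id) <=2:
--             new_id = new_id.__add__(new_id[-1])
--         else:
--             break
--
--     answer = new_id
--     return answer
-- ===== SOURCE B (Python) =====
-- def solution(new_id):
--     # One fused pass: lower-case, keep only allowed chars, and collapse dot runs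
--     # on the fly; then strip dots, guard empty, truncate+rstrip, pad arithmetically.
--     out = []
--     prev_dot = False
--     for ch in new_id:
--         c = ch.lower()
--         if '0' <= c <= '9' or 'a' <= c <= 'z' or c == '-' or c == '_':
--             out.append(c)
--             prev_dot = False
--         elif c == '.':
--             if not prev_dot:
--                 out.append(c)
--             prev_dot = True
--     s = ''.join(out).strip('.')
--     if not s:
--         s = 'a'
--     s = s[:15].rstrip('.')
--     return s + s[-1] * (3 - len(s))
-- ===== Notes on version B (the rewrite author's own statement) =====
-- stated objective: simpler
-- what changed: Replaces A's per-index loop of whole-string replace() calls plus its dot-collapsing fix-point while-loop with one fused left-to-right pass that lowercases, filters and collapses dot runs via a prev-dot flag, and replaces the final append-while-loop with arithmetic padding s + s[-1]*(3-len(s)).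
import Mathlib
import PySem

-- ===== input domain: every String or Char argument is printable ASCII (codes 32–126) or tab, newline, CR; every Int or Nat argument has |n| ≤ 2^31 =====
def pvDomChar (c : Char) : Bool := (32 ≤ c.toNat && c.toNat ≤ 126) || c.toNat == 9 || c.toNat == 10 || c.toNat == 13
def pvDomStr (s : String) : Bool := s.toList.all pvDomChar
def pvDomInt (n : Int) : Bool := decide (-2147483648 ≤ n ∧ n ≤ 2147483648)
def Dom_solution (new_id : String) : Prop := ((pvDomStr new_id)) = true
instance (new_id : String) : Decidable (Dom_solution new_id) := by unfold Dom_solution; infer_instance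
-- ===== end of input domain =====

-- B replaces A's per-index loop of whole-string replace() calls and its dot-collapsing fix-point while-loop by one
-- fused filtering/dot-collapsing pass and arithmetic padding (objective: simpler; same return value).

-- ===== PORT A =====
-- A's string operations are ported on new_id.toList via PySem.Chars (exact on the ASCII domain).
def canUse : List Char := ['-', '_', '.']

-- [2단계] for i in range(length): if new_id[i] is not allowed: new_id = new_id.replace(new_id[i], " ")
def step2 (len : Nat) (t : List Char) : List Char :=
  (PySem.List.pyRange 0 (len : Int)).foldl (fun s i =>
    match PySem.List.pyGet? s i with
    | none => s  -- IndexError: unreachable (replace keeps the length, so i < len = |s| throughout)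
    | some c =>
      if '0' ≤ c ∧ c ≤ '9' then s
      else if 'a' ≤ c ∧ c ≤ 'z' then s
      else if c ∈ canUse then s
      else PySem.Chars.replace s [c] [' ']) t

-- termination helpers for dotLoop (the port cites replaceDD_length_lt in decreasing_by)
def rep2 : List Char → List Char
  | [] => []
  | [c] => [c]
  | c :: d :: t => if c = '.' ∧ d = '.' then '.' :: rep2 t else c :: rep2 (d :: t)

theorem go_dd_zero (l acc : List Char) :
    PySem.Chars.replace.go ['.', '.'] ['.'] 0 l acc = acc.reverse ++ l := rfl

theorem go_dd_nil (n : Nat) (acc : List Char) :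
    PySem.Chars.replace.go ['.', '.'] ['.'] (n+1) [] acc = acc.reverse := rfl

theorem go_dd_cons (n : Nat) (c : Char) (t acc : List Char) :
    PySem.Chars.replace.go ['.', '.'] ['.'] (n+1) (c :: t) acc =
      if (['.', '.'] : List Char).isPrefixOf (c :: t) then
        PySem.Chars.replace.go ['.', '.'] ['.'] n (List.drop 2 (c :: t)) (['.'].reverse ++ acc)
      else PySem.Chars.replace.go ['.', '.'] ['.'] n t (c :: acc) := rfl

theorem replace_go_dd (fuel : Nat) : ∀ (l acc : List Char), l.length ≤ fuel →
    PySem.Chars.replace.go ['.', '.'] ['.'] fuel l acc = acc.reverse ++ rep2 l := by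
  induction fuel with
  | zero =>
    intro l acc h
    have hl : l = [] := List.eq_nil_of_length_eq_zero (Nat.le_zero.mp h)
    subst hl
    simp [go_dd_zero, rep2]
  | succ n ih =>
    intro l acc h
    match l with
    | [] => simp [go_dd_nil, rep2]
    | [c] =>
      have hpre : (['.', '.'] : List Char).isPrefixOf [c] = false := by
        simp [List.isPrefixOf]
      rw [go_dd_cons, hpre]
      simp only [Bool.false_eq_true, if_false]
      rw [ih [] (c :: acc) (by simp)]
      simp [rep2]
    | c :: d :: t =>
      by_cases hcd : c = '.' ∧ d = '.'
      · obtain ⟨hc, hd⟩ := hcd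
        subst hc; subst hd
        have hpre : (['.', '.'] : List Char).isPrefixOf ('.' :: '.' :: t) = true := by
          simp [List.isPrefixOf]
        rw [go_dd_cons, hpre]
        simp only [if_true]
        rw [List.drop_succ_cons, List.drop_succ_cons, List.drop_zero,
          ih t _ (by simp at h ⊢; omega)]
        simp [rep2]
      · have hpre : (['.', '.'] : List Char).isPrefixOf (c :: d :: t) = false := by
          simp [List.isPrefixOf]
          intro hc hd
          exact hcd ⟨hc.symm, hd.symm⟩
        rw [go_dd_cons, hpre]
        simp only [Bool.false_eq_true, if_false]
        rw [ih (d :: t) (c :: acc) (by simp at h ⊢; omega)]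
        simp [rep2, hcd]

theorem replace_dd_eq (s : List Char) :
    PySem.Chars.replace s ['.', '.'] ['.'] = rep2 s := by
  have hne : (['.', '.'] : List Char).isEmpty = false := by simp
  rw [PySem.Chars.replace]
  simp only [hne, Bool.false_eq_true, if_false]
  rw [replace_go_dd s.length s [] (le_refl _)]
  simp

theorem rep2_length_le (l : List Char) : (rep2 l).length ≤ l.length := by
  induction l using rep2.induct with
  | case1 => simp [rep2]
  | case2 c => simp [rep2]
  | case3 c d t hcd ih => simp [rep2, hcd]; omega
  | case4 c d t hcd ih => simp [rep2, hcd] at ih ⊢; omega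

theorem rep2_lt_of_infix : ∀ {l : List Char}, ['.', '.'] <:+: l →
    (rep2 l).length < l.length := by
  intro l
  induction l using rep2.induct with
  | case1 => intro h; simpa using h.length_le
  | case2 c => intro h; simpa using h.length_le
  | case3 c d t hcd ih =>
    intro _
    have := rep2_length_le t
    simp [rep2, hcd]
    omega
  | case4 c d t hcd ih =>
    intro h
    have htail : ['.', '.'] <:+: (d :: t) := by
      rcases List.infix_cons_iff.mp h with hp | hi
      · exfalso
        rcases hp with ⟨r, hr⟩
        simp at hr
        exact hcd ⟨hr.1.symm, hr.2.1.symm⟩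
      · exact hi
    have := ih htail
    simp [rep2, hcd] at this ⊢
    omega

theorem replaceDD_length_lt {s : List Char} (h : PySem.Chars.isIn ['.', '.'] s = true) :
    (PySem.Chars.replace s ['.', '.'] ['.']).length < s.length := by
  rw [replace_dd_eq]
  exact rep2_lt_of_infix ((PySem.Chars.isIn_iff_infix _ _).mp h)

-- [3단계] while True: if not('..' in new_id): break; new_id = new_id.replace('..', '.')
def dotLoop (s : List Char) : List Char :=
  if h : PySem.Chars.isIn ['.', '.'] s then dotLoop (PySem.Chars.replace s ['.', '.'] ['.']) else s
termination_by s.length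
decreasing_by exact replaceDD_length_lt h

-- hand ports of s.lstrip('.') / s.rstrip('.') (exact: drop leading / trailing '.' characters)
def lstripDot (s : List Char) : List Char := s.dropWhile (· == '.')
def rstripDot (s : List Char) : List Char := (s.reverse.dropWhile (· == '.')).reverse

-- [7단계] while True: if len(new_id) <= 2: new_id = new_id + new_id[-1] else: break
def padLoop (s : List Char) : List Char :=
  if _h : s.length ≤ 2 then
    match PySem.List.pyGet? s (-1) with
    | none => s  -- IndexError on s[-1]: unreachable (s is nonempty at this point of A)
    | some c => padLoop (s ++ [c])
  else s
termination_by 3 - s.length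
decreasing_by simp; omega

def solution (new_id : String) : String :=
  let t0 := new_id.toList
  let length := t0.length
  let s1 := PySem.Chars.lower t0                                -- [1단계] new_id.lower()
  let s2 := PySem.Chars.replace (step2 length s1) [' '] []      -- [2단계] + .replace(" ", "")
  let s3 := dotLoop s2                                          -- [3단계]
  let s4 := rstripDot (lstripDot s3)                            -- [4단계]
  let s5 := if s4 = [] then ['a'] else s4                       -- [5단계]
  let s6 := rstripDot (if 16 ≤ s5.length then PySem.List.slice s5 (some 0) (some 15) else s5)  -- [6단계]
  String.ofList (padLoop s6)                                    -- [7단계]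

-- ===== PORT B =====
def keepB (c : Char) : Bool := ('0' ≤ c && c ≤ '9') || ('a' ≤ c && c ≤ 'z') || c == '-' || c == '_'

-- loop body of B's single fused pass (state: out, prev_dot)
def bstep (st : List Char × Bool) (ch : Char) : List Char × Bool :=
  let c := PySem.Chars.lowerChar ch
  if keepB c then (st.1 ++ [c], false)
  else if c == '.' then (if st.2 then st.1 else st.1 ++ [c], true)
  else st

def solution_alt (new_id : String) : String :=
  let p := new_id.toList.foldl bstep ([], false)
  let s1 := PySem.Chars.stripChars p.1 ['.']                    -- ''.join(out).strip('.')
  let s2 := if s1 = [] then ['a'] else s1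
  let s3 := rstripDot (PySem.List.slice s2 none (some 15))      -- s[:15].rstrip('.')
  String.ofList (s3 ++ match PySem.List.pyGet? s3 (-1) with     -- s + s[-1] * (3 - len(s))
    | some c => List.replicate (3 - s3.length) c
    | none => [])  -- IndexError on s[-1]: unreachable (s3 is nonempty here)

-- ===== PRECONDITION & SPEC =====
def Spec_solution (new_id : String) (out : String) : Prop := out = solution_alt new_id
instance (new_id : String) (out : String) : Decidable (Spec_solution new_id out) := by unfold Spec_solution; infer_instance

-- ===== CLAIM (what is proved, stated in full; the proofs are below) =====
def Claim_equal_solution : Prop := ∀ (new_id : String), Dom_solution new_id → Spec_solution new_id (solution new_id)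

-- ===== LEMMAS AND PROOFS =====

-- a character kept by step 2 (after lower-casing)
def allA (c : Char) : Bool := keepB c || c == '.'

-- the state of A's step-2 string after the processed indices have revealed the characters `seen`
def repl (seen : List Char) (c : Char) : Char := if allA c = false ∧ c ∈ seen then ' ' else c

theorem repl_of_bad_mem {seen : List Char} {c : Char} (h1 : allA c = false) (h2 : c ∈ seen) :
    repl seen c = ' ' := by unfold repl; rw [if_pos ⟨h1, h2⟩]

theorem repl_of_good {seen : List Char} {c : Char} (h : allA c = true) : repl seen c = c := by
  unfold repl
  rw [if_neg]
  rintro ⟨h1, -⟩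
  simp [h] at h1

theorem repl_of_not_mem {seen : List Char} {c : Char} (h : c ∉ seen) : repl seen c = c := by
  unfold repl
  rw [if_neg]
  rintro ⟨-, h2⟩
  exact h h2

theorem repl_of_not_cond {seen : List Char} {c : Char} (h : ¬(allA c = false ∧ c ∈ seen)) :
    repl seen c = c := by unfold repl; rw [if_neg h]

theorem repl_append_ne {seen : List Char} {c d : Char} (h : d ≠ c) :
    repl (seen ++ [c]) d = repl seen d := by
  unfold repl
  simp only [List.mem_append, List.mem_singleton, h, or_false]

theorem go_s_zero (z : Char) (w l acc : List Char) :
    PySem.Chars.replace.go [z] w 0 l acc = acc.reverse ++ l := rfl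

theorem go_s_nil (z : Char) (w : List Char) (n : Nat) (acc : List Char) :
    PySem.Chars.replace.go [z] w (n+1) [] acc = acc.reverse := rfl

theorem go_s_cons (z : Char) (w : List Char) (n : Nat) (c : Char) (t acc : List Char) :
    PySem.Chars.replace.go [z] w (n+1) (c :: t) acc =
      if ([z] : List Char).isPrefixOf (c :: t) then
        PySem.Chars.replace.go [z] w n t (w.reverse ++ acc)
      else PySem.Chars.replace.go [z] w n t (c :: acc) := rfl

-- single-character replace is a flatMap
theorem replace_go_single (z : Char) (w : List Char) (fuel : Nat) : ∀ (l acc : List Char),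
    l.length ≤ fuel → PySem.Chars.replace.go [z] w fuel l acc
      = acc.reverse ++ l.flatMap (fun c => if c = z then w else [c]) := by
  induction fuel with
  | zero =>
    intro l acc h
    have hl : l = [] := List.eq_nil_of_length_eq_zero (Nat.le_zero.mp h)
    subst hl
    simp [go_s_zero]
  | succ n ih =>
    intro l acc h
    match l with
    | [] => simp [go_s_nil]
    | c :: t =>
      by_cases hc : c = z
      · subst hc
        have hpre : ([c] : List Char).isPrefixOf (c :: t) = true := by simp [List.isPrefixOf]
        rw [go_s_cons, hpre]
        simp only [if_true]
        rw [ih t _ (by simp at h ⊢; omega)]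
        simp
      · have hpre : ([z] : List Char).isPrefixOf (c :: t) = false := by
          simp [List.isPrefixOf]
          exact fun hz => absurd hz.symm hc
        rw [go_s_cons, hpre]
        simp only [Bool.false_eq_true, if_false]
        rw [ih t (c :: acc) (by simp at h ⊢; omega)]
        simp [hc]

theorem replace_single (s : List Char) (z : Char) (w : List Char) :
    PySem.Chars.replace s [z] w = s.flatMap (fun c => if c = z then w else [c]) := by
  have hne : ([z] : List Char).isEmpty = false := by simp
  rw [PySem.Chars.replace]
  simp only [hne, Bool.false_eq_true, if_false]
  rw [replace_go_single z w s.length s [] (le_refl _)]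
  simp

theorem flatMap_if_single (z w : Char) (l : List Char) :
    l.flatMap (fun c => if c = z then [w] else [c]) = l.map (fun c => if c = z then w else c) := by
  induction l with
  | nil => simp
  | cons c t ih =>
    by_cases hc : c = z <;> simp [hc, ih]

theorem allA_space : allA ' ' = false := by decide

theorem allA_iff (c : Char) : allA c = true ↔
    ('0' ≤ c ∧ c ≤ '9') ∨ ('a' ≤ c ∧ c ≤ 'z') ∨ c = '-' ∨ c = '_' ∨ c = '.' := by
  simp [allA, keepB, or_assoc]

-- the if-chain of A's step-2 body returns its string unchanged exactly on allA characters
theorem chain_of_allA {s : List Char} {c : Char} (hc : allA c = true) :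
    (if '0' ≤ c ∧ c ≤ '9' then s
     else if 'a' ≤ c ∧ c ≤ 'z' then s
     else if c ∈ canUse then s
     else PySem.Chars.replace s [c] [' ']) = s := by
  rcases (allA_iff c).mp hc with h | h | h | h | h
  · rw [if_pos h]
  · rw [if_neg (fun hx => absurd (h.1.trans hx.2) (by decide)), if_pos h]
  · subst h; rw [if_neg (by decide), if_neg (by decide), if_pos (by decide)]
  · subst h; rw [if_neg (by decide), if_neg (by decide), if_pos (by decide)]
  · subst h; rw [if_neg (by decide), if_neg (by decide), if_pos (by decide)]

theorem chain_of_not_allA {s : List Char} {c : Char} (hc : allA c = false) :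
    (if '0' ≤ c ∧ c ≤ '9' then s
     else if 'a' ≤ c ∧ c ≤ 'z' then s
     else if c ∈ canUse then s
     else PySem.Chars.replace s [c] [' ']) = PySem.Chars.replace s [c] [' '] := by
  have h1 : ¬('0' ≤ c ∧ c ≤ '9') := fun h => by simp [(allA_iff c).mpr (Or.inl h)] at hc
  have h2 : ¬('a' ≤ c ∧ c ≤ 'z') := fun h => by
    simp [(allA_iff c).mpr (Or.inr (Or.inl h))] at hc
  have h3 : ¬(c ∈ canUse) := by
    intro h
    have hm : c = '-' ∨ c = '_' ∨ c = '.' := by simpa [canUse] using h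
    rcases hm with h | h | h <;> simp [(allA_iff c).mpr (by tauto)] at hc
  rw [if_neg h1, if_neg h2, if_neg h3]

-- step-2 loop invariant
theorem step2_inv (t : List Char) : ∀ (i : Nat), i ≤ t.length →
    (List.range i).foldl (fun s (k : Nat) =>
      match PySem.List.pyGet? s ((k : Nat) : Int) with
      | none => s
      | some c =>
        if '0' ≤ c ∧ c ≤ '9' then s
        else if 'a' ≤ c ∧ c ≤ 'z' then s
        else if c ∈ canUse then s
        else PySem.Chars.replace s [c] [' ']) t = t.map (repl (t.take i)) := by
  intro i
  induction i with
  | zero =>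
    intro _
    simp only [List.range_zero, List.foldl_nil]
    symm
    calc t.map (repl (t.take 0)) = t.map id := List.map_congr_left (fun a _ => by simp [repl])
      _ = t := List.map_id t
  | succ i ih =>
    intro h
    have hi : i < t.length := h
    rw [List.range_succ, List.foldl_append, ih (Nat.le_of_lt hi)]
    simp only [List.foldl_cons, List.foldl_nil]
    have hget : PySem.List.pyGet? (t.map (repl (t.take i))) ((i : Nat) : Int)
        = some (repl (t.take i) t[i]) := by
      rw [PySem.List.pyGet?_natCast]
      simp [hi]
    have htake : t.take (i+1) = t.take i ++ [t[i]] := by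
      rw [List.take_add_one]
      simp [hi]
    by_cases ha : allA t[i] = true
    · have hz : repl (t.take i) t[i] = t[i] := repl_of_good ha
      simp only [hget, hz]
      rw [chain_of_allA ha]
      refine List.map_congr_left (fun d _ => ?_)
      by_cases hd : d = t[i]
      · subst hd; rw [repl_of_good ha, htake, repl_of_good ha]
      · rw [htake, repl_append_ne hd]
    · have ha' : allA t[i] = false := by simpa using ha
      by_cases hm : t[i] ∈ t.take i
      · have hz : repl (t.take i) t[i] = ' ' := repl_of_bad_mem ha' hm
        simp only [hget, hz]
        rw [chain_of_not_allA allA_space, replace_single, flatMap_if_single]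
        rw [List.map_map]
        refine List.map_congr_left (fun d _ => ?_)
        simp only [Function.comp]
        by_cases hd : d = t[i]
        · subst hd
          rw [repl_of_bad_mem ha' hm, htake, repl_of_bad_mem ha' (List.mem_append_right _ (List.mem_singleton_self _))]
          simp
        · rw [htake, repl_append_ne hd]
          by_cases hc : allA d = false ∧ d ∈ t.take i
          · rw [repl_of_bad_mem hc.1 hc.2]
            simp
          · rw [repl_of_not_cond hc]
            split <;> simp_all
      · have hz : repl (t.take i) t[i] = t[i] := repl_of_not_mem hm
        simp only [hget, hz]
        rw [chain_of_not_allA ha', replace_single, flatMap_if_single]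
        rw [List.map_map]
        refine List.map_congr_left (fun d _ => ?_)
        simp only [Function.comp]
        by_cases hd : d = t[i]
        · subst hd
          rw [repl_of_not_mem hm, htake, repl_of_bad_mem ha' (List.mem_append_right _ (List.mem_singleton_self _))]
          simp
        · rw [htake, repl_append_ne hd]
          by_cases hc : allA d = false ∧ d ∈ t.take i
          · rw [repl_of_bad_mem hc.1 hc.2]
            split <;> rfl
          · rw [repl_of_not_cond hc, if_neg hd]

theorem step2_eq (t : List Char) : step2 t.length t = t.map (repl t) := by
  unfold step2
  rw [PySem.List.pyRange_zero_natCast, List.foldl_map]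
  rw [step2_inv t t.length (le_refl _), List.take_length]

-- removing the spaces leaves exactly the allowed characters
theorem despace_aux (seen : List Char) : ∀ (t : List Char), (∀ d ∈ t, d ∈ seen) →
    (t.map (repl seen)).flatMap (fun c => if c = ' ' then ([] : List Char) else [c])
      = t.filter allA := by
  intro t
  induction t with
  | nil => simp
  | cons d t ih =>
    intro hmem
    have hd : d ∈ seen := hmem d (List.mem_cons_self)
    have ht := fun x hx => hmem x (List.mem_cons_of_mem d hx)
    by_cases ha : allA d = true
    · have hrd : repl seen d = d := by simp [repl, ha]
      have hne : d ≠ ' ' := by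
        intro h; subst h; rw [allA_space] at ha; exact Bool.false_ne_true ha
      simp [hrd, hne, ha, ih ht]
    · have ha' : allA d = false := by simpa using ha
      have hrd : repl seen d = ' ' := by simp [repl, ha', hd]
      simp [hrd, ha', ih ht]

theorem despace_eq (t : List Char) :
    PySem.Chars.replace (t.map (repl t)) [' '] [] = t.filter allA := by
  rw [replace_single]
  exact despace_aux t t (fun d hd => hd)

-- collapse of consecutive dots (pd = "the previous kept character was a dot")
def col : Bool → List Char → List Char
  | _, [] => []
  | pd, c :: t => if c = '.' then (if pd then col true t else '.' :: col true t) else c :: col false t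

theorem col_rep2 : ∀ (l : List Char) (pd : Bool), col pd (rep2 l) = col pd l := by
  intro l
  induction l using rep2.induct with
  | case1 => intro pd; rfl
  | case2 c => intro pd; rfl
  | case3 c d t hcd ih =>
    intro pd
    obtain ⟨hc, hd⟩ := hcd
    subst hc; subst hd
    cases pd <;> simp [rep2, col, ih]
  | case4 c d t hcd ih =>
    intro pd
    by_cases hc : c = '.'
    · have hd : d ≠ '.' := fun hx => hcd ⟨hc, hx⟩
      cases pd <;> simp [rep2, col, hc, hd, ih]
    · cases pd <;> simp [rep2, col, hc, ih]

theorem col_of_not_infix : ∀ (l : List Char) (pd : Bool), ¬ ['.', '.'] <:+: l →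
    (pd = true → l.head? ≠ some '.') → col pd l = l := by
  intro l
  induction l with
  | nil => intro pd _ _; rfl
  | cons c t ih =>
    intro pd h hh
    have htail : ¬ ['.', '.'] <:+: t := fun hx => h (List.infix_cons hx)
    by_cases hc : c = '.'
    · subst hc
      cases pd with
      | true => exact absurd (by simp : (('.' : Char) :: t).head? = some '.') (hh rfl)
      | false =>
        have hthead : t.head? ≠ some '.' := by
          intro hx
          rcases t with _ | ⟨d, t'⟩
          · simp at hx
          · simp at hx
            subst hx
            exact h ⟨[], t', by simp⟩
        have hcol : col false ('.' :: t) = '.' :: col true t := by simp [col]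
        rw [hcol, ih true htail (fun _ => hthead)]
    · have hcol : col pd (c :: t) = c :: col false t := by cases pd <;> simp [col, hc]
      rw [hcol, ih false htail (by simp)]

theorem dotLoop_eq (s : List Char) : dotLoop s = col false s := by
  induction s using dotLoop.induct with
  | case1 s hin ih =>
    rw [dotLoop, dif_pos hin, ih, replace_dd_eq, col_rep2]
  | case2 s hin =>
    rw [dotLoop, dif_neg hin]
    have hfalse : PySem.Chars.isIn ['.', '.'] s = false := by
      cases hx : PySem.Chars.isIn ['.', '.'] s
      · rfl
      · exact absurd hx hin
    exact (col_of_not_infix s false ((PySem.Chars.isIn_eq_false_iff _ _).mp hfalse) (by simp)).symm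

-- B's fused pass, as a structural function
def colB : Bool → List Char → List Char
  | _, [] => []
  | pd, ch :: t =>
    let c := PySem.Chars.lowerChar ch
    if keepB c then c :: colB false t
    else if c == '.' then (if pd then colB true t else '.' :: colB true t)
    else colB pd t

def dflag : Bool → List Char → Bool
  | pd, [] => pd
  | pd, ch :: t =>
    let c := PySem.Chars.lowerChar ch
    if keepB c then dflag false t
    else if c == '.' then dflag true t
    else dflag pd t

theorem bfold : ∀ (l : List Char) (acc : List Char) (pd : Bool),
    l.foldl bstep (acc, pd) = (acc ++ colB pd l, dflag pd l) := by
  intro l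
  induction l with
  | nil => intro acc pd; simp [colB, dflag]
  | cons ch t ih =>
    intro acc pd
    by_cases hk : keepB (PySem.Chars.lowerChar ch) = true
    · simp [List.foldl_cons, bstep, hk, colB, dflag, ih]
    · by_cases hd : PySem.Chars.lowerChar ch = '.'
      · have hkd : keepB '.' = false := by decide
        cases pd <;> simp [List.foldl_cons, bstep, hd, hkd, colB, dflag, ih]
      · have hd' : (PySem.Chars.lowerChar ch == '.') = false := by simp [hd]
        simp [List.foldl_cons, bstep, hk, hd', colB, dflag, ih]

theorem keepB_not_dot {c : Char} (h : keepB c = true) : c ≠ '.' := by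
  intro hx; subst hx; exact absurd h (by decide)

theorem colB_eq : ∀ (l : List Char) (pd : Bool),
    colB pd l = col pd ((PySem.Chars.lower l).filter allA) := by
  intro l
  induction l with
  | nil => intro pd; rfl
  | cons ch t ih =>
    intro pd
    by_cases hk : keepB (PySem.Chars.lowerChar ch) = true
    · have hall : allA (PySem.Chars.lowerChar ch) = true := by simp [allA, hk]
      have hnd : PySem.Chars.lowerChar ch ≠ '.' := keepB_not_dot hk
      simp [colB, hk, PySem.Chars.lower, hall, col, hnd, ih]
    · by_cases hd : PySem.Chars.lowerChar ch = '.'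
      · have hall : allA (PySem.Chars.lowerChar ch) = true := by simp [allA, hd]
        have hkd : keepB '.' = false := by decide
        have had : allA '.' = true := by decide
        cases pd <;> simp [colB, hd, hkd, had, PySem.Chars.lower, col, ih]
      · have hall : allA (PySem.Chars.lowerChar ch) = false := by simp [allA, hk, hd]
        simp [colB, hk, hd, PySem.Chars.lower, hall, ih]

-- strip('.') = lstrip('.') then rstrip('.')
theorem contains_dot (c : Char) : (['.'] : List Char).contains c = (c == '.') := by
  rw [List.contains_cons, List.contains_nil, Bool.or_false]

theorem stripChars_dot (x : List Char) : PySem.Chars.stripChars x ['.'] = rstripDot (lstripDot x) := by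
  unfold PySem.Chars.stripChars rstripDot lstripDot
  have hpq : (fun c => (['.'] : List Char).contains c) = (fun c : Char => c == '.') :=
    funext contains_dot
  rw [hpq]

theorem pyGet?_neg_one (s : List Char) : PySem.List.pyGet? s (-1) = s.getLast? := by
  cases s with
  | nil => rfl
  | cons x xs =>
    simp only [PySem.List.pyGet?, PySem.List.pyIdx?]
    rw [if_neg (by omega), if_pos (by simp)]
    have h3 : (x :: xs).length - (-(-1:Int)).toNat = xs.length := by simp
    rw [h3, List.getLast?_eq_getElem?]
    simp

-- the padding loop is arithmetic padding with the last character
theorem padLoop_eq (s : List Char) (h : s ≠ []) :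
    padLoop s = s ++ (match PySem.List.pyGet? s (-1) with
      | some c => List.replicate (3 - s.length) c
      | none => []) := by
  match s with
  | [] => exact absurd rfl h
  | [a] =>
    have h1 : PySem.List.pyGet? [a] (-1) = some a := by rw [pyGet?_neg_one]; rfl
    have h2 : PySem.List.pyGet? [a, a] (-1) = some a := by rw [pyGet?_neg_one]; rfl
    have e1 : padLoop [a] = padLoop [a, a] := by
      conv_lhs => unfold padLoop
      simp [h1]
    have e2 : padLoop [a, a] = padLoop [a, a, a] := by
      conv_lhs => unfold padLoop
      simp [h2]
    have e3 : padLoop [a, a, a] = [a, a, a] := by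
      unfold padLoop
      simp
    rw [e1, e2, e3, h1]
    simp [List.replicate]
  | [a, b] =>
    have h1 : PySem.List.pyGet? [a, b] (-1) = some b := by rw [pyGet?_neg_one]; rfl
    have e1 : padLoop [a, b] = padLoop [a, b, b] := by
      conv_lhs => unfold padLoop
      simp [h1]
    have e3 : padLoop [a, b, b] = [a, b, b] := by
      unfold padLoop
      simp
    rw [e1, e3, h1]
    simp
  | a :: b :: c :: t =>
    have e3 : padLoop (a :: b :: c :: t) = a :: b :: c :: t := by
      unfold padLoop
      simp
    rw [e3]
    cases hx : PySem.List.pyGet? (a :: b :: c :: t) (-1) <;> simp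

theorem rstripDot_prefix (x : List Char) : rstripDot x <+: x := by
  have h := List.dropWhile_suffix (l := x.reverse) (fun c : Char => c == '.')
  have h2 := List.reverse_prefix.mpr h
  simpa [rstripDot] using h2

theorem head?_of_prefix {x y : List Char} (h : x <+: y) (hne : x ≠ []) : y.head? = x.head? := by
  rcases h with ⟨r, hr⟩
  subst hr
  rcases x with _ | ⟨a, t⟩
  · exact absurd rfl hne
  · simp

theorem head?_rstripDot (x : List Char) (h : rstripDot x ≠ []) :
    (rstripDot x).head? = x.head? :=
  (head?_of_prefix (rstripDot_prefix x) h).symm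

theorem head?_lstripDot_ne (x : List Char) : (lstripDot x).head? ≠ some '.' := by
  induction x with
  | nil => simp [lstripDot]
  | cons a t ih =>
    by_cases h : a = '.'
    · simpa [lstripDot, h] using ih
    · simp [lstripDot, List.dropWhile_cons, h]

theorem rstripDot_ne_nil (x : List Char) (hne : x ≠ []) (hh : x.head? ≠ some '.') :
    rstripDot x ≠ [] := by
  intro h0
  have h2 : x.reverse.dropWhile (fun c : Char => c == '.') = [] := by
    have h3 := congrArg List.reverse h0
    simpa [rstripDot] using h3
  have h3 := List.dropWhile_eq_nil_iff.mp h2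
  rcases x with _ | ⟨a, t⟩
  · exact hne rfl
  · have ha := h3 a (by simp)
    simp at ha
    exact hh (by simp [ha])

-- the truncation in step 6 is take 15 in both branches
theorem trunc_eq (s : List Char) :
    (if 16 ≤ s.length then PySem.List.slice s (some 0) (some 15) else s) = s.take 15 := by
  by_cases h : 16 ≤ s.length
  · rw [if_pos h]
    have hs := PySem.List.slice_natCast s 0 15
    simpa using hs
  · rw [if_neg h]
    exact (List.take_of_length_le (by omega)).symm

theorem slice_to_15 (s : List Char) : PySem.List.slice s none (some 15) = s.take 15 := by
  have hs := PySem.List.slice_to s (b := 15) (by norm_num)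
  simpa using hs

theorem take15_ne {x : List Char} (h : x ≠ []) : x.take 15 ≠ [] := by
  simp [List.take_eq_nil_iff, h]

theorem head?_take15 (x : List Char) : (x.take 15).head? = x.head? := by
  cases x <;> simp

-- after steps 4–5 the string is nonempty and does not start with a dot
theorem s5_facts (Y : List Char) :
    (if rstripDot (lstripDot Y) = [] then ['a'] else rstripDot (lstripDot Y)) ≠ [] ∧
    (if rstripDot (lstripDot Y) = [] then ['a'] else rstripDot (lstripDot Y)).head? ≠ some '.' := by
  by_cases h : rstripDot (lstripDot Y) = []
  · simp [h]
  · rw [if_neg h]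
    refine ⟨h, ?_⟩
    rw [head?_rstripDot _ h]
    exact head?_lstripDot_ne _

-- ===== VERDICT (by name: the statement is the Claim_ definition above) =====
theorem solution_spec : Claim_equal_solution := by
  intro new_id _
  simp only [Spec_solution, solution, solution_alt]
  refine congrArg String.ofList ?_
  have hlen : new_id.toList.length = (PySem.Chars.lower new_id.toList).length := by
    simp [PySem.Chars.lower]
  rw [hlen, step2_eq, despace_eq, dotLoop_eq]
  have hB : (new_id.toList.foldl bstep ([], false)).1
      = col false ((PySem.Chars.lower new_id.toList).filter allA) := by
    rw [bfold new_id.toList [] false]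
    simp [colB_eq]
  rw [hB, stripChars_dot, trunc_eq, slice_to_15]
  obtain ⟨h5ne, h5head⟩ := s5_facts (col false ((PySem.Chars.lower new_id.toList).filter allA))
  exact padLoop_eq _ (rstripDot_ne_nil _ (take15_ne h5ne) (by rw [head?_take15]; exact h5head))
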